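-- pv_equiv track=rewrite | github.com/TanmayAgarwal123/Litcode-Solution | M3L1q1.py | maximize_subsequences
-- ===== SOURCE A (Python) =====
-- def count_subsequences(text, pattern):
--     dp = [[0] * (len(pattern) + 1) for _ in range(len(text) + 1)]
--
--     for i in range(len(text) + 1):
--         dp[i][0] = 1
--
--     for i in range(1, len(text) + 1):
--         for j in range(1, len(pattern) + 1):
--             if text[i - 1] == pattern[j - 1]:
--                 dp[i][j] = dp[i - 1][j - 1] + dp[i - 1][j]
--             else:
--                 dp[i][j] = dp[i - 1][j]
--     return dp[-1][-1]
--
-- def maximize_subsequences(text, pattern):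
--     max_count = 0
--     for i in range(len(text) + 1):
--         for char in pattern:
--             new_text = text[:i] + char + text[i:]
--             count = count_subsequences(new_text, pattern)
--             max_count = max(max_count, count)
--
--     return max_count
-- ===== SOURCE B (Python) =====
-- def maximize_subsequences(text, pattern):
--     n, m = len(text), len(pattern)
--     if m == 0:
--         return 0
--     # pre[i][j] = number of subsequences of pattern[:j] in text[:i]
--     pre = [[1] + [0] * m]
--     for i in range(1, n + 1):
--         row = pre[-1]
--         ch = text[i - 1]
--         pre.append([1] + [row[j] + (row[j - 1] if ch == pattern[j - 1] else 0)
--                           for j in range(1, m + 1)])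
--     # suf[i][j] = number of subsequences of pattern[j:] in text[i:]
--     suf = [[0] * m + [1]]
--     for i in range(n - 1, -1, -1):
--         row = suf[0]
--         ch = text[i]
--         suf.insert(0, [row[j] + (row[j + 1] if ch == pattern[j] else 0)
--                        for j in range(m)] + [1])
--     base = pre[n][m]
--     best = 0
--     for i in range(n + 1):
--         gains = {}
--         for j in range(m):
--             c = pattern[j]
--             gains[c] = gains.get(c, 0) + pre[i][j] * suf[i][j + 1]
--         best = max(best, max(gains.values()))
--     return base + best
-- ===== Notes on version B (the rewrite author's own statement) =====
-- stated objective: faster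
-- what changed: Instead of rebuilding a full subsequence-count DP table for every insertion position and pattern character (A), B computes prefix and suffix subsequence DP tables of the original text once and evaluates each candidate insertion as base count plus a per-character sum of prefix*suffix products, maximised per position via one dictionary pass.
import Mathlib
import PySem

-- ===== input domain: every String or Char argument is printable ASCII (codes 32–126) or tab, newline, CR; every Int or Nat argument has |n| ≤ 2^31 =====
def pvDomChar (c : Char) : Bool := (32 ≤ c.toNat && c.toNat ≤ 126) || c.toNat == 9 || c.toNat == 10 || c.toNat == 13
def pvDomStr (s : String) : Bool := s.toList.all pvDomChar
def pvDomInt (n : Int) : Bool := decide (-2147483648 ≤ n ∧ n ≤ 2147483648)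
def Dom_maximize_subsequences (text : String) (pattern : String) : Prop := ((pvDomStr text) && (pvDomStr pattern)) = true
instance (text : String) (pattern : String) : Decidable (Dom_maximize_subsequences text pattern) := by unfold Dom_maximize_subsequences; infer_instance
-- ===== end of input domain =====

-- B replaces A's per-insertion full DP recount by one prefix/suffix subsequence DP over the
-- original text plus an O(m) delta per insertion point (asymptotically faster).


-- ===== PORT A =====
-- dp[i][j] read/write helpers (indices are nonnegative and in range at every use in A)
def pvGet2 (dp : List (List Int)) (i j : Int) : Int :=
  PySem.List.pyGetD (PySem.List.pyGetD dp i []) j 0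

def pvSet2 (dp : List (List Int)) (i j : Int) (v : Int) : List (List Int) :=
  PySem.List.pySetD dp i (PySem.List.pySetD (PySem.List.pyGetD dp i []) j v)

-- count_subsequences, on the character lists
def pvCountSub (t p : List Char) : Int :=
  let dp0 := (List.range (t.length + 1)).map (fun _ => List.replicate (p.length + 1) (0 : Int))
  let dp1 := (PySem.List.pyRange 0 ((t.length : Int) + 1) 1).foldl (fun dp i => pvSet2 dp i 0 1) dp0
  let dp2 := (PySem.List.pyRange 1 ((t.length : Int) + 1) 1).foldl (fun dp i =>
    (PySem.List.pyRange 1 ((p.length : Int) + 1) 1).foldl (fun dp j =>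
      if PySem.List.pyGetD t (i - 1) ' ' = PySem.List.pyGetD p (j - 1) ' ' then
        pvSet2 dp i j (pvGet2 dp (i - 1) (j - 1) + pvGet2 dp (i - 1) j)
      else
        pvSet2 dp i j (pvGet2 dp (i - 1) j)) dp) dp1
  PySem.List.pyGetD (PySem.List.pyGetD dp2 (-1) []) (-1) 0

def maximize_subsequences (text : String) (pattern : String) : Int :=
  let t := text.toList
  let p := pattern.toList
  (PySem.List.pyRange 0 ((t.length : Int) + 1) 1).foldl (fun max_count i =>
    p.foldl (fun max_count ch =>
      let new_text := PySem.List.slice t none (some i) ++ [ch] ++ PySem.List.slice t (some i) none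
      max max_count (pvCountSub new_text p)) max_count) 0

-- ===== PORT B =====
def maximize_subsequences_alt (text : String) (pattern : String) : Int :=
  let t := text.toList
  let p := pattern.toList
  let n : Int := t.length
  let m : Int := p.length
  if m = 0 then 0 else
  -- pre[i][j] = number of subsequences of pattern[:j] in text[:i]
  let pre := (PySem.List.pyRange 1 (n + 1) 1).foldl (fun pre i =>
      let row := PySem.List.pyGetD pre (-1) []
      let ch := PySem.List.pyGetD t (i - 1) ' '
      pre ++ [[(1 : Int)] ++ (PySem.List.pyRange 1 (m + 1) 1).map (fun j =>
        PySem.List.pyGetD row j 0 +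
          (if ch = PySem.List.pyGetD p (j - 1) ' ' then PySem.List.pyGetD row (j - 1) 0 else 0))])
    [[(1 : Int)] ++ List.replicate p.length 0]
  -- suf[i][j] = number of subsequences of pattern[j:] in text[i:]
  let suf := (PySem.List.pyRange (n - 1) (-1) (-1)).foldl (fun suf i =>
      let row := PySem.List.pyGetD suf 0 []
      let ch := PySem.List.pyGetD t i ' '
      PySem.List.insert suf 0 ((PySem.List.pyRange 0 m 1).map (fun j =>
        PySem.List.pyGetD row j 0 +
          (if ch = PySem.List.pyGetD p j ' ' then PySem.List.pyGetD row (j + 1) 0 else 0)) ++ [(1 : Int)]))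
    [List.replicate p.length 0 ++ [(1 : Int)]]
  let base := PySem.List.pyGetD (PySem.List.pyGetD pre n []) m 0
  let best := (PySem.List.pyRange 0 (n + 1) 1).foldl (fun best i =>
      let gains := (PySem.List.pyRange 0 m 1).foldl (fun d j =>
          let c := PySem.List.pyGetD p j ' '
          d.insert c (d.getD c 0 +
            PySem.List.pyGetD (PySem.List.pyGetD pre i []) j 0 *
            PySem.List.pyGetD (PySem.List.pyGetD suf i []) (j + 1) 0)) (PySem.Dict.empty)
      -- gains is nonempty here (m ≥ 1), so Python's max(gains.values()) returns a value
      max best ((PySem.List.max? gains.values (fun v => v)).getD 0)) 0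
  base + best

-- ===== PRECONDITION & SPEC =====
def Spec_maximize_subsequences (text : String) (pattern : String) (out : Int) : Prop := out = maximize_subsequences_alt text pattern
instance (text : String) (pattern : String) (out : Int) : Decidable (Spec_maximize_subsequences text pattern out) := by unfold Spec_maximize_subsequences; infer_instance

-- ===== CLAIM (what is proved, stated in full; the proofs are below) =====
def Claim_equal_maximize_subsequences : Prop := ∀ (text : String) (pattern : String), Dom_maximize_subsequences text pattern → Spec_maximize_subsequences text pattern (maximize_subsequences text pattern)

-- ===== LEMMAS AND PROOFS =====

-- The mathematical subsequence count: pvCnt t p = number of ways p occurs in t as a subsequence.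
def pvCnt : List Char → List Char → Int
  | _, [] => 1
  | [], _ :: _ => 0
  | x :: t, q :: qs => (if x = q then pvCnt t qs else 0) + pvCnt t (q :: qs)

-- pvDelta c v u p = number of occurrences of p in u ++ c :: v that use the inserted c.
def pvDelta (c : Char) (v : List Char) : List Char → List Char → Int
  | [], [] => 0
  | [], q :: qs => if q = c then pvCnt v qs else 0
  | _ :: _, [] => 0
  | x :: u, q :: qs => pvDelta c v u (q :: qs) + (if x = q then pvDelta c v u qs else 0)

def pvRowP (u p : List Char) : List Int := (List.range (p.length + 1)).map (fun j => pvCnt u (p.take j))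
def pvRowS (v p : List Char) : List Int := (List.range (p.length + 1)).map (fun j => pvCnt v (p.drop j))

def pvVal (t p : List Char) (k : ℕ) (c : Char) : Int := pvCnt t p + pvDelta c (t.drop k) (t.take k) p

def pvW (t p : List Char) (k j : ℕ) : Int := pvCnt (t.take k) (p.take j) * pvCnt (t.drop k) (p.drop (j + 1))

def pvGains (t p : List Char) (k : ℕ) : PySem.Dict Char Int :=
  (List.range p.length).foldl (fun d j =>
    d.insert (p.getD j ' ') (d.getD (p.getD j ' ') 0 + pvW t p k j)) PySem.Dict.empty

def pvMi (t p : List Char) (k : ℕ) : Int := ((PySem.List.max? (pvGains t p k).values (fun v => v)).getD 0)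

-- ---- basic facts about pvCnt / pvDelta ----

lemma pvCnt_nil_pat (t : List Char) : pvCnt t [] = 1 := by cases t <;> rfl

lemma pvCnt_nil_of_ne_nil {p : List Char} (h : p ≠ []) : pvCnt [] p = 0 := by
  cases p with
  | nil => exact absurd rfl h
  | cons q qs => rfl

lemma pvCnt_nonneg (t p : List Char) : 0 ≤ pvCnt t p := by
  induction t generalizing p with
  | nil => cases p with
    | nil => simp [pvCnt]
    | cons q qs => simp [pvCnt]
  | cons x t ih =>
    cases p with
    | nil => simp [pvCnt_nil_pat]
    | cons q qs =>
      have h1 := ih qs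
      have h2 := ih (q :: qs)
      simp only [pvCnt]
      split <;> omega

lemma pvDelta_nonneg (c : Char) (v u p : List Char) : 0 ≤ pvDelta c v u p := by
  induction u generalizing p with
  | nil =>
    cases p with
    | nil => simp [pvDelta]
    | cons q qs =>
      have := pvCnt_nonneg v qs
      simp only [pvDelta]; split <;> omega
  | cons x u ih =>
    cases p with
    | nil => simp [pvDelta]
    | cons q qs =>
      have h1 := ih (q :: qs)
      have h2 := ih qs
      simp only [pvDelta]; split <;> omega

lemma pvCnt_snoc (u : List Char) (x : Char) (ps : List Char) (q : Char) :
    pvCnt (u ++ [x]) (ps ++ [q]) = pvCnt u (ps ++ [q]) + (if x = q then pvCnt u ps else 0) := by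
  induction u generalizing ps with
  | nil =>
    cases ps with
    | nil => simp [pvCnt]
    | cons r rs =>
      have h1 : pvCnt [] (rs ++ [q]) = 0 := pvCnt_nil_of_ne_nil (by simp)
      have h2 : pvCnt [] (r :: (rs ++ [q])) = 0 := pvCnt_nil_of_ne_nil (by simp)
      have h3 : pvCnt [] (r :: rs) = 0 := pvCnt_nil_of_ne_nil (by simp)
      simp [pvCnt, h1, h2, h3]
  | cons y u ih =>
    cases ps with
    | nil =>
      have h := ih []
      simp only [List.nil_append] at h
      simp only [List.nil_append, List.cons_append, pvCnt, pvCnt_nil_pat, h]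
      by_cases hy : y = q <;> by_cases hx : x = q <;> simp [hy, hx] <;> omega
    | cons r rs =>
      have h1 := ih rs
      have h2 := ih (r :: rs)
      simp only [List.cons_append] at h2
      simp only [List.cons_append, pvCnt, h1, h2]
      by_cases hy : y = r <;> by_cases hx : x = q <;> simp [hy, hx] <;> omega

lemma pvCnt_insert (c : Char) (v : List Char) (u p : List Char) :
    pvCnt (u ++ c :: v) p = pvCnt (u ++ v) p + pvDelta c v u p := by
  induction u generalizing p with
  | nil =>
    cases p with
    | nil => simp [pvCnt_nil_pat, pvDelta]
    | cons q qs =>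
      simp only [List.nil_append, pvCnt, pvDelta]
      by_cases h : c = q
      · subst h; simp
        try omega
      · rw [if_neg h, if_neg (fun hq : q = c => h hq.symm)]; omega
  | cons x u ih =>
    cases p with
    | nil => simp [pvCnt_nil_pat, pvDelta]
    | cons q qs =>
      simp only [List.cons_append, pvCnt, pvDelta, ih]
      by_cases hx : x = q <;> simp [hx] <;> ring

-- The Finset-sum form of pvDelta, as computed from the prefix/suffix tables.
lemma pvSum_eq_delta (c : Char) (u v : List Char) (p : List Char) :
    (∑ j ∈ Finset.range p.length,
      (if p.getD j ' ' = c then pvCnt u (p.take j) * pvCnt v (p.drop (j + 1)) else 0))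
    = pvDelta c v u p := by
  induction u generalizing p with
  | nil =>
    cases p with
    | nil => simp [pvDelta]
    | cons q qs =>
      rw [List.length_cons, Finset.sum_range_succ']
      have hz : (∑ j ∈ Finset.range qs.length,
          (if (q :: qs).getD (j + 1) ' ' = c then
            pvCnt [] ((q :: qs).take (j + 1)) * pvCnt v ((q :: qs).drop (j + 1 + 1)) else 0)) = 0 := by
        apply Finset.sum_eq_zero
        intro j hj
        have h0 : pvCnt [] (q :: List.take j qs) = 0 := pvCnt_nil_of_ne_nil (by simp)
        simp [h0]
      rw [hz]
      simp [pvDelta, pvCnt_nil_pat, eq_comm]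
  | cons x u ih =>
    cases p with
    | nil => simp [pvDelta]
    | cons q qs =>
      rw [List.length_cons, Finset.sum_range_succ']
      have hterm : ∀ j, (if (q :: qs).getD (j + 1) ' ' = c then
            pvCnt (x :: u) ((q :: qs).take (j + 1)) * pvCnt v ((q :: qs).drop (j + 1 + 1)) else 0)
          = (if qs.getD j ' ' = c then pvCnt u (q :: qs.take j) * pvCnt v (qs.drop (j + 1)) else 0)
            + (if x = q then (if qs.getD j ' ' = c then pvCnt u (qs.take j) * pvCnt v (qs.drop (j + 1)) else 0) else 0) := by
        intro j
        simp only [List.getD_cons_succ, List.take_succ_cons, List.drop_succ_cons, pvCnt]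
        by_cases hx : x = q
        · simp [hx]
          split <;> ring
        · simp [hx]
      rw [Finset.sum_congr rfl (fun j _ => hterm j), Finset.sum_add_distrib]
      have h2 : (∑ j ∈ Finset.range qs.length,
          (if x = q then (if qs.getD j ' ' = c then pvCnt u (qs.take j) * pvCnt v (qs.drop (j + 1)) else 0) else 0))
          = if x = q then pvDelta c v u qs else 0 := by
        by_cases hx : x = q
        · simp only [hx, if_true]; exact ih qs
        · simp [hx]
      rw [h2]
      -- remaining sum plus the j = 0 term is pvDelta c v u (q :: qs), by ih at (q :: qs)
      have h3 := ih (q :: qs)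
      rw [List.length_cons, Finset.sum_range_succ'] at h3
      have hterm2 : ∀ j, (if (q :: qs).getD (j + 1) ' ' = c then
            pvCnt u ((q :: qs).take (j + 1)) * pvCnt v ((q :: qs).drop (j + 1 + 1)) else 0)
          = (if qs.getD j ' ' = c then pvCnt u (q :: qs.take j) * pvCnt v (qs.drop (j + 1)) else 0) := by
        intro j; simp only [List.getD_cons_succ, List.take_succ_cons, List.drop_succ_cons]
      rw [Finset.sum_congr rfl (fun j _ => hterm2 j)] at h3
      simp only [List.getD_cons_zero, List.take_zero, List.drop_succ_cons, List.drop_zero,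
        pvCnt_nil_pat, one_mul, List.take_succ_cons, List.drop_one] at h3 ⊢
      simp only [pvDelta]
      omega

-- ---- generic fold/indexing helpers ----

lemma pvInsert_zero {α : Type} (xs : List α) (v : α) : PySem.List.insert xs 0 v = v :: xs := by
  simp [PySem.List.insert, PySem.List.sliceIndices, PySem.List.clampIdx]

lemma pvFoldInv {σ : Type} (step : σ → Int → σ) (P : ℕ → σ → Prop) (s0 : σ) :
    ∀ (K : ℕ), P 0 s0 → (∀ k s, k < K → P k s → P (k + 1) (step s (k : Int))) →
    P K ((PySem.List.pyRange 0 (K : Int) 1).foldl step s0) := by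
  intro K
  induction K with
  | zero => intro h0 _; simpa [PySem.List.pyRange_one_eq_nil (le_refl (0 : Int))] using h0
  | succ K ih =>
    intro h0 hstep
    have hc : ((K + 1 : ℕ) : Int) = (K : Int) + 1 := by push_cast; ring
    rw [hc, PySem.List.pyRange_one_succ_right (by omega), List.foldl_append]
    exact hstep K _ (Nat.lt_succ_self K) (ih h0 (fun k s hk => hstep k s (Nat.lt_succ_of_lt hk)))

lemma pvFoldInv1 {σ : Type} (step : σ → Int → σ) (P : ℕ → σ → Prop) (s0 : σ) :
    ∀ (K : ℕ), P 0 s0 → (∀ k s, k < K → P k s → P (k + 1) (step s ((k : Int) + 1))) →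
    P K ((PySem.List.pyRange 1 ((K : Int) + 1) 1).foldl step s0) := by
  intro K
  induction K with
  | zero => intro h0 _; simpa [PySem.List.pyRange_one_eq_nil (by norm_num : (1 : Int) ≤ 1)] using h0
  | succ K ih =>
    intro h0 hstep
    have hc : ((K + 1 : ℕ) : Int) + 1 = ((K : Int) + 1) + 1 := by push_cast; ring
    rw [hc, PySem.List.pyRange_one_succ_right (by omega), List.foldl_append]
    exact hstep K _ (Nat.lt_succ_self K) (ih h0 (fun k s hk => hstep k s (Nat.lt_succ_of_lt hk)))

lemma pvFoldInvDown {σ : Type} (step : σ → Int → σ) (P : ℕ → σ → Prop) :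
    ∀ (N : ℕ) (s0 : σ), P N s0 → (∀ k s, k < N → P (k + 1) s → P k (step s (k : Int))) →
    P 0 ((PySem.List.pyRange ((N : Int) - 1) (-1) (-1)).foldl step s0) := by
  intro N
  induction N with
  | zero =>
    intro s0 h0 _
    simpa [PySem.List.pyRange_neg_one_eq_nil (by norm_num : (0 : Int) - 1 ≤ -1)] using h0
  | succ N ih =>
    intro s0 h0 hstep
    have hc : ((N + 1 : ℕ) : Int) - 1 = (N : Int) := by push_cast; ring
    rw [hc, PySem.List.pyRange_neg_one_cons (by omega : (-1 : Int) < (N : Int))]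
    simp only [List.foldl_cons]
    exact ih (step s0 (N : Int)) (hstep N s0 (Nat.lt_succ_self N) h0)
      (fun k s hk => hstep k s (Nat.lt_succ_of_lt hk))

lemma pvSet_map_range {α : Type} (f : ℕ → α) (N i : ℕ) (hi : i < N) (v : α) :
    ((List.range N).map f).set i v = (List.range N).map (fun j => if j = i then v else f j) := by
  apply List.ext_getElem
  · simp
  · intro k h1 h2
    simp only [List.length_map, List.length_range] at h1 h2
    rw [List.getElem_set]
    simp only [List.getElem_map, List.getElem_range]
    by_cases h : i = k
    · simp [h]
    · simp [h, Ne.symm h]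

lemma pvGetD_map_range_int {α : Type} (f : ℕ → α) (N : ℕ) (i : Int) (d : α)
    (h0 : 0 ≤ i) (h1 : i < (N : Int)) :
    PySem.List.pyGetD ((List.range N).map f) i d = f i.toNat := by
  rw [PySem.List.pyGetD_eq_getElem _ d h0 (by simpa using h1)]
  simp only [List.getElem_map, List.getElem_range]

lemma pvMapRange_congr {α : Type} {N : ℕ} {f g : ℕ → α} (h : ∀ j < N, f j = g j) :
    (List.range N).map f = (List.range N).map g := by
  apply List.map_congr_left
  intro j hj
  exact h j (List.mem_range.mp hj)

lemma pvGetLast_map_range {α : Type} (f : ℕ → α) (N : ℕ) (h : (List.range (N + 1)).map f ≠ []) :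
    ((List.range (N + 1)).map f).getLast h = f N := by
  rw [List.getLast_eq_getElem]
  simp

-- dictionary counting fold (arbitrary integer weights)
lemma pvDict_getD_fold (l : List (Char × Int)) (d : PySem.Dict Char Int) (c : Char) :
    (l.foldl (fun d x => d.insert x.1 (d.getD x.1 0 + x.2)) d).getD c 0
      = d.getD c 0 + ((l.filter (fun x => x.1 == c)).map Prod.snd).sum := by
  induction l generalizing d with
  | nil => simp
  | cons a l ih =>
    simp only [List.foldl_cons, ih, List.filter_cons]
    by_cases h : a.1 = c
    · simp [h, PySem.Dict.getD_insert]; ring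
    · rw [PySem.Dict.getD_insert, if_neg (fun hc : c = a.1 => h hc.symm)]
      simp [h]

lemma pvSum_filter_range (m : ℕ) (f : ℕ → Char × Int) (c : Char) :
    ((((List.range m).map f).filter (fun x => x.1 == c)).map Prod.snd).sum
      = ∑ j ∈ Finset.range m, (if (f j).1 = c then (f j).2 else 0) := by
  induction m with
  | zero => simp
  | succ m ih =>
    rw [List.range_succ, List.map_append, List.filter_append, List.map_append, List.sum_append,
      Finset.sum_range_succ, ih]
    by_cases h : (f m).1 = c <;> simp [h]

lemma pvBaseRowEq (m : ℕ) :
    (1 : Int) :: List.replicate m 0 = (List.range (m + 1)).map (fun b => if b = 0 then (1 : Int) else 0) := by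
  rw [List.range_succ_eq_map, List.map_cons, List.map_map]
  have h : ∀ j ∈ List.range m, ((fun b => if b = 0 then (1 : Int) else 0) ∘ Nat.succ) j = 0 := by
    intro j _; simp
  rw [List.map_congr_left h]
  simp [List.eq_replicate_iff]

lemma pvRowP_nil (p : List Char) : pvRowP [] p = (1 : Int) :: List.replicate p.length 0 := by
  rw [pvBaseRowEq, pvRowP]
  apply pvMapRange_congr
  intro j hj
  cases j with
  | zero => simp [pvCnt_nil_pat]
  | succ j =>
    have hlen : j < p.length := by omega
    have hne : p.take (j + 1) ≠ [] := by
      refine fun h => ?_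
      rcases List.take_eq_nil_iff.mp h with h1 | h1
      · omega
      · rw [h1] at hlen; simp at hlen
    simp [pvCnt_nil_of_ne_nil hne]

lemma pvRowS_nil (p : List Char) : pvRowS [] p = List.replicate p.length 0 ++ [(1 : Int)] := by
  rw [pvRowS, List.range_succ, List.map_append]
  congr 1
  · apply List.eq_replicate_iff.mpr
    constructor
    · simp
    · intro b hb
      simp only [List.mem_map, List.mem_range] at hb
      obtain ⟨j, hj, rfl⟩ := hb
      have hne : p.drop j ≠ [] := by simp [List.drop_eq_nil_iff]; omega
      exact pvCnt_nil_of_ne_nil hne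
  · simp [pvCnt_nil_pat]


lemma pvTake_succ {α : Type} (l : List α) {k : ℕ} (h : k < l.length) :
    l.take (k + 1) = l.take k ++ [l[k]] := by
  rw [List.take_add_one]
  simp [List.getElem?_eq_getElem h]

lemma pvSet2_map_range (f : ℕ → List Int) (N : ℕ) (i j : Int) (hi0 : 0 ≤ i)
    (hiN : i < (N : Int)) (v : Int) :
    pvSet2 ((List.range N).map f) i j v
      = (List.range N).map (fun a => if a = i.toNat then PySem.List.pySetD (f i.toNat) j v else f a) := by
  rw [pvSet2, PySem.List.pySetD_of_nonneg _ _ hi0,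
      pvGetD_map_range_int f N i [] hi0 hiN, pvSet_map_range f N i.toNat (by omega) _]

def pvPartial (t p : List Char) (k j : ℕ) : List Int :=
  (List.range (p.length + 1)).map (fun b =>
    if b ≤ j then pvCnt (t.take (k + 1)) (p.take b) else if b = 0 then (1 : Int) else 0)

lemma pvPartial_zero (t p : List Char) (k : ℕ) :
    pvPartial t p k 0 = (1 : Int) :: List.replicate p.length 0 := by
  rw [pvBaseRowEq, pvPartial]
  apply pvMapRange_congr
  intro b hb
  by_cases h0 : b = 0
  · subst h0; simp [pvCnt_nil_pat]
  · have hb0 : ¬ b ≤ 0 := by omega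
    simp [h0, hb0]

lemma pvPartial_full (t p : List Char) (k : ℕ) :
    pvPartial t p k p.length = pvRowP (t.take (k + 1)) p := by
  rw [pvPartial, pvRowP]
  apply pvMapRange_congr
  intro b hb
  rw [if_pos (by omega)]

lemma pvStage1 (n m : ℕ) :
    (PySem.List.pyRange 0 ((n : Int) + 1) 1).foldl (fun dp i => pvSet2 dp i 0 1)
      ((List.range (n + 1)).map (fun _ => List.replicate (m + 1) (0 : Int)))
    = (List.range (n + 1)).map (fun _ => (1 : Int) :: List.replicate m 0) := by
  have hb : ((n : Int) + 1) = ((n + 1 : ℕ) : Int) := by push_cast; ring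
  rw [hb]
  have h := pvFoldInv (fun dp i => pvSet2 dp i 0 1)
    (fun k dp => dp = (List.range (n + 1)).map
      (fun a => if a < k then (1 : Int) :: List.replicate m 0 else List.replicate (m + 1) 0))
    ((List.range (n + 1)).map (fun _ => List.replicate (m + 1) (0 : Int))) (n + 1)
    (pvMapRange_congr (fun j _ => by simp))
    (by
      intro k dp hk hdp
      subst hdp
      beta_reduce
      rw [pvSet2_map_range _ (n + 1) _ 0 (by omega) (by exact_mod_cast hk) 1]
      apply pvMapRange_congr
      intro a ha
      simp only [Int.toNat_natCast]
      by_cases hak : a = k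
      · subst hak
        rw [if_pos rfl, if_neg (lt_irrefl a), if_pos (show a < a + 1 by omega),
            PySem.List.pySetD_of_nonneg _ _ (by omega)]
        simp [List.replicate_succ]
      · rw [if_neg hak]
        by_cases h2 : a < k
        · rw [if_pos h2, if_pos (by omega)]
        · rw [if_neg h2, if_neg (by omega)])
  rw [h]
  exact pvMapRange_congr (fun a ha => by rw [if_pos ha])

lemma pvInner (t p : List Char) (k : ℕ) (hk : k < t.length) (dp : List (List Int))
    (hdp : dp = (List.range (t.length + 1)).map (fun a =>
      if a ≤ k then pvRowP (t.take a) p else (1 : Int) :: List.replicate p.length 0)) :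
    (PySem.List.pyRange 1 ((p.length : Int) + 1) 1).foldl (fun dp j =>
      if PySem.List.pyGetD t ((k : Int) + 1 - 1) ' ' = PySem.List.pyGetD p (j - 1) ' ' then
        pvSet2 dp ((k : Int) + 1) j (pvGet2 dp ((k : Int) + 1 - 1) (j - 1) + pvGet2 dp ((k : Int) + 1 - 1) j)
      else pvSet2 dp ((k : Int) + 1) j (pvGet2 dp ((k : Int) + 1 - 1) j)) dp
    = (List.range (t.length + 1)).map (fun a =>
      if a ≤ k + 1 then pvRowP (t.take a) p else (1 : Int) :: List.replicate p.length 0) := by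
  have e1 : (k : Int) + 1 - 1 = (k : Int) := by ring
  have h := pvFoldInv1
    (fun dp j =>
      if PySem.List.pyGetD t ((k : Int) + 1 - 1) ' ' = PySem.List.pyGetD p (j - 1) ' ' then
        pvSet2 dp ((k : Int) + 1) j (pvGet2 dp ((k : Int) + 1 - 1) (j - 1) + pvGet2 dp ((k : Int) + 1 - 1) j)
      else pvSet2 dp ((k : Int) + 1) j (pvGet2 dp ((k : Int) + 1 - 1) j))
    (fun j dp' => dp' = (List.range (t.length + 1)).map (fun a =>
      if a ≤ k then pvRowP (t.take a) p
      else if a = k + 1 then pvPartial t p k j else (1 : Int) :: List.replicate p.length 0))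
    dp p.length
    (by
      rw [hdp]
      apply pvMapRange_congr
      intro a ha
      by_cases h1 : a ≤ k
      · rw [if_pos h1, if_pos h1]
      · by_cases h2 : a = k + 1
        · rw [if_neg h1, if_neg h1, if_pos h2, pvPartial_zero]
        · rw [if_neg h1, if_neg h1, if_neg h2])
    (by
      intro j dp' hj hdp'
      subst hdp'
      beta_reduce
      have e2 : ((j : ℕ) : Int) + 1 - 1 = ((j : ℕ) : Int) := by ring
      have hch : PySem.List.pyGetD t ((k : Int) + 1 - 1) ' ' = t[k] := by
        rw [e1, PySem.List.pyGetD_eq_getElem _ _ (by omega) (by exact_mod_cast hk)]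
        simp
      have hcp : PySem.List.pyGetD p (((j : ℕ) : Int) + 1 - 1) ' ' = p[j] := by
        rw [e2, PySem.List.pyGetD_eq_getElem _ _ (by omega) (by exact_mod_cast hj)]
        simp
      have hrowk : PySem.List.pyGetD ((List.range (t.length + 1)).map (fun a =>
          if a ≤ k then pvRowP (t.take a) p
          else if a = k + 1 then pvPartial t p k j else (1 : Int) :: List.replicate p.length 0))
          ((k : Int) + 1 - 1) [] = pvRowP (t.take k) p := by
        rw [e1, pvGetD_map_range_int _ _ _ _ (by omega) (by push_cast; omega)]
        simp only [Int.toNat_natCast]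
        rw [if_pos (le_refl k)]
      have hg1 : pvGet2 ((List.range (t.length + 1)).map (fun a =>
          if a ≤ k then pvRowP (t.take a) p
          else if a = k + 1 then pvPartial t p k j else (1 : Int) :: List.replicate p.length 0))
          ((k : Int) + 1 - 1) (((j : ℕ) : Int) + 1 - 1) = pvCnt (t.take k) (p.take j) := by
        rw [pvGet2, hrowk, e2, pvRowP,
          pvGetD_map_range_int _ _ _ _ (by omega) (by push_cast; omega)]
        simp only [Int.toNat_natCast]
      have hg2 : pvGet2 ((List.range (t.length + 1)).map (fun a =>
          if a ≤ k then pvRowP (t.take a) p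
          else if a = k + 1 then pvPartial t p k j else (1 : Int) :: List.replicate p.length 0))
          ((k : Int) + 1 - 1) (((j : ℕ) : Int) + 1) = pvCnt (t.take k) (p.take (j + 1)) := by
        rw [pvGet2, hrowk, pvRowP]
        have e3 : ((j : ℕ) : Int) + 1 = ((j + 1 : ℕ) : Int) := by push_cast; ring
        rw [e3, pvGetD_map_range_int _ _ _ _ (by omega) (by push_cast; omega)]
        simp only [Int.toNat_natCast]
      have hval : pvCnt (t.take (k + 1)) (p.take (j + 1))
          = pvCnt (t.take k) (p.take (j + 1)) + (if t[k] = p[j] then pvCnt (t.take k) (p.take j) else 0) := by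
        rw [pvTake_succ t hk, pvTake_succ p hj]
        exact pvCnt_snoc _ _ _ _
      have hset : ∀ v : Int, v = pvCnt (t.take (k + 1)) (p.take (j + 1)) →
          pvSet2 ((List.range (t.length + 1)).map (fun a =>
            if a ≤ k then pvRowP (t.take a) p
            else if a = k + 1 then pvPartial t p k j else (1 : Int) :: List.replicate p.length 0))
            ((k : Int) + 1) (((j : ℕ) : Int) + 1) v
          = (List.range (t.length + 1)).map (fun a =>
            if a ≤ k then pvRowP (t.take a) p
            else if a = k + 1 then pvPartial t p k (j + 1) else (1 : Int) :: List.replicate p.length 0) := by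
        intro v hv
        have e4 : ((k : Int) + 1) = ((k + 1 : ℕ) : Int) := by push_cast; ring
        rw [e4, pvSet2_map_range _ (t.length + 1) _ _ (by omega) (by push_cast; omega) v]
        simp only [Int.toNat_natCast]
        simp only [show ¬ (k + 1 ≤ k) from by omega, ite_false, ite_true]
        have hnewrow : PySem.List.pySetD (pvPartial t p k j) (((j : ℕ) : Int) + 1) v
            = pvPartial t p k (j + 1) := by
          rw [PySem.List.pySetD_of_nonneg _ _ (by omega)]
          have e5 : (((j : ℕ) : Int) + 1).toNat = j + 1 := by omega
          rw [e5, pvPartial, pvSet_map_range _ _ _ (by omega) v, pvPartial]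
          apply pvMapRange_congr
          intro b hb2
          by_cases hbj : b = j + 1
          · subst hbj; rw [if_pos rfl, if_pos (le_refl _), hv]
          · rw [if_neg hbj]
            by_cases hble : b ≤ j
            · rw [if_pos hble, if_pos (by omega)]
            · rw [if_neg hble, if_neg (show ¬ b ≤ j + 1 by omega)]
        rw [hnewrow]
        apply pvMapRange_congr
        intro a ha
        by_cases h1 : a = k + 1
        · subst h1
          rw [if_pos rfl, if_neg (by omega), if_pos rfl]
        · rw [if_neg h1]
          by_cases h2 : a ≤ k
          · rw [if_pos h2, if_pos h2]
          · rw [if_neg h2, if_neg h2, if_neg h1, if_neg h1]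
      rw [hch, hcp]
      by_cases hc : t[k] = p[j]
      · rw [if_pos hc, hg1, hg2,
          hset (pvCnt (t.take k) (p.take j) + pvCnt (t.take k) (p.take (j + 1)))
            (by rw [hval, if_pos hc]; ring)]
      · rw [if_neg hc, hg2,
          hset (pvCnt (t.take k) (p.take (j + 1))) (by rw [hval, if_neg hc]; ring)])
  rw [h]
  apply pvMapRange_congr
  intro a ha
  by_cases h1 : a ≤ k
  · rw [if_pos h1, if_pos (by omega)]
  · by_cases h2 : a = k + 1
    · subst h2
      rw [if_neg h1, if_pos rfl, pvPartial_full, if_pos (le_refl _)]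
    · rw [if_neg h1, if_neg h2, if_neg (by omega)]

lemma pvStage2 (t p : List Char) :
    (PySem.List.pyRange 1 ((t.length : Int) + 1) 1).foldl (fun dp i =>
      (PySem.List.pyRange 1 ((p.length : Int) + 1) 1).foldl (fun dp j =>
        if PySem.List.pyGetD t (i - 1) ' ' = PySem.List.pyGetD p (j - 1) ' ' then
          pvSet2 dp i j (pvGet2 dp (i - 1) (j - 1) + pvGet2 dp (i - 1) j)
        else pvSet2 dp i j (pvGet2 dp (i - 1) j)) dp)
      ((List.range (t.length + 1)).map (fun _ => (1 : Int) :: List.replicate p.length 0))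
    = (List.range (t.length + 1)).map (fun a => pvRowP (t.take a) p) := by
  have h := pvFoldInv1
    (fun dp i =>
      (PySem.List.pyRange 1 ((p.length : Int) + 1) 1).foldl (fun dp j =>
        if PySem.List.pyGetD t (i - 1) ' ' = PySem.List.pyGetD p (j - 1) ' ' then
          pvSet2 dp i j (pvGet2 dp (i - 1) (j - 1) + pvGet2 dp (i - 1) j)
        else pvSet2 dp i j (pvGet2 dp (i - 1) j)) dp)
    (fun k dp => dp = (List.range (t.length + 1)).map (fun a =>
      if a ≤ k then pvRowP (t.take a) p else (1 : Int) :: List.replicate p.length 0))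
    ((List.range (t.length + 1)).map (fun _ => (1 : Int) :: List.replicate p.length 0)) t.length
    (by
      apply pvMapRange_congr
      intro a ha
      by_cases h0 : a = 0
      · subst h0
        rw [if_pos (le_refl 0), List.take_zero, pvRowP_nil]
      · rw [if_neg (by omega)])
    (by
      intro k dp hk hdp
      beta_reduce
      exact pvInner t p k hk dp hdp)
  rw [h]
  apply pvMapRange_congr
  intro a ha
  rw [if_pos (by omega)]

lemma pvCS_eq (t p : List Char) : pvCountSub t p = pvCnt t p := by
  simp only [pvCountSub]
  rw [pvStage1 t.length p.length, pvStage2 t p]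
  have hne : (List.range (t.length + 1)).map (fun a => pvRowP (t.take a) p) ≠ [] := by simp
  rw [PySem.List.pyGetD_neg_one _ _ hne, pvGetLast_map_range _ _ hne, List.take_length]
  have hne2 : pvRowP t p ≠ [] := by simp [pvRowP]
  rw [PySem.List.pyGetD_neg_one _ _ hne2, List.getLast_eq_getElem]
  simp only [pvRowP, List.length_map, List.length_range, Nat.add_sub_cancel,
    List.getElem_map, List.getElem_range, List.take_length]

-- ---- B's tables ----

lemma pvNewRowP (t p : List Char) (k : ℕ) (hk : k < t.length) :
    [(1 : Int)] ++ (PySem.List.pyRange 1 ((p.length : Int) + 1) 1).map (fun j =>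
      PySem.List.pyGetD (pvRowP (t.take k) p) j 0 +
        (if t[k] = PySem.List.pyGetD p (j - 1) ' '
         then PySem.List.pyGetD (pvRowP (t.take k) p) (j - 1) 0 else 0))
    = pvRowP (t.take (k + 1)) p := by
  rw [PySem.List.pyRange_one]
  have em : (((p.length : Int) + 1) - 1).toNat = p.length := by omega
  rw [em, List.map_map]
  have hmap : (List.range p.length).map ((fun (j : Int) =>
      PySem.List.pyGetD (pvRowP (t.take k) p) j 0 +
        (if t[k] = PySem.List.pyGetD p (j - 1) ' '
         then PySem.List.pyGetD (pvRowP (t.take k) p) (j - 1) 0 else 0)) ∘ (fun (x : ℕ) => (1 : Int) + ↑x))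
      = (List.range p.length).map (fun j => pvCnt (t.take (k + 1)) (p.take (j + 1))) := by
    apply pvMapRange_congr
    intro j hj
    simp only [Function.comp]
    have hj1 : ((1 : Int) + (j : ℕ)) = ((j + 1 : ℕ) : Int) := by push_cast; ring
    have hj2 : ((j + 1 : ℕ) : Int) - 1 = ((j : ℕ) : Int) := by push_cast; ring
    rw [hj1, hj2]
    rw [pvRowP, pvGetD_map_range_int _ _ _ _ (by omega) (by push_cast; omega),
      pvGetD_map_range_int _ _ _ _ (by omega) (by push_cast; omega)]
    have hpj : PySem.List.pyGetD p ((j : ℕ) : Int) ' ' = p[j] := by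
      rw [PySem.List.pyGetD_eq_getElem _ _ (by omega) (by exact_mod_cast hj)]
      simp
    rw [hpj]
    simp only [Int.toNat_natCast]
    rw [pvTake_succ t hk, pvTake_succ p hj, pvCnt_snoc]
  rw [hmap]
  rw [show pvRowP (t.take (k + 1)) p = (List.range (p.length + 1)).map
      (fun j => pvCnt (t.take (k + 1)) (p.take j)) from rfl,
    List.range_succ_eq_map, List.map_cons, List.map_map]
  simp [pvCnt_nil_pat, Nat.succ_eq_add_one]

lemma pvNewRowS (t p : List Char) (k : ℕ) (hk : k < t.length) :
    (PySem.List.pyRange 0 ((p.length : Int)) 1).map (fun j =>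
      PySem.List.pyGetD (pvRowS (t.drop (k + 1)) p) j 0 +
        (if t[k] = PySem.List.pyGetD p j ' '
         then PySem.List.pyGetD (pvRowS (t.drop (k + 1)) p) (j + 1) 0 else 0)) ++ [(1 : Int)]
    = pvRowS (t.drop k) p := by
  rw [PySem.List.pyRange_zero_nat, List.map_map]
  have hmap : (List.range p.length).map ((fun (j : Int) =>
      PySem.List.pyGetD (pvRowS (t.drop (k + 1)) p) j 0 +
        (if t[k] = PySem.List.pyGetD p j ' '
         then PySem.List.pyGetD (pvRowS (t.drop (k + 1)) p) (j + 1) 0 else 0)) ∘ (fun (x : ℕ) => (x : Int)))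
      = (List.range p.length).map (fun j => pvCnt (t.drop k) (p.drop j)) := by
    apply pvMapRange_congr
    intro j hj
    simp only [Function.comp]
    rw [pvRowS, pvGetD_map_range_int _ _ _ _ (by omega) (by push_cast; omega)]
    have hj1 : ((j : ℕ) : Int) + 1 = ((j + 1 : ℕ) : Int) := by push_cast; ring
    rw [hj1, pvGetD_map_range_int _ _ _ _ (by omega) (by push_cast; omega)]
    have hpj : PySem.List.pyGetD p ((j : ℕ) : Int) ' ' = p[j] := by
      rw [PySem.List.pyGetD_eq_getElem _ _ (by omega) (by exact_mod_cast hj)]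
      simp
    rw [hpj]
    simp only [Int.toNat_natCast]
    rw [List.drop_eq_getElem_cons (show k < t.length from hk),
      List.drop_eq_getElem_cons (show j < p.length from hj)]
    simp only [pvCnt]
    ring
  rw [hmap]
  rw [show pvRowS (t.drop k) p = (List.range (p.length + 1)).map
      (fun j => pvCnt (t.drop k) (p.drop j)) from rfl,
    List.range_succ, List.map_append, List.map_cons, List.map_nil]
  simp [List.drop_length, pvCnt_nil_pat]

lemma pvPre_eq (t p : List Char) :
    ((PySem.List.pyRange 1 ((t.length : Int) + 1) 1).foldl (fun pre i =>
      let row := PySem.List.pyGetD pre (-1) []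
      let ch := PySem.List.pyGetD t (i - 1) ' '
      pre ++ [[(1 : Int)] ++ (PySem.List.pyRange 1 ((p.length : Int) + 1) 1).map (fun j =>
        PySem.List.pyGetD row j 0 +
          (if ch = PySem.List.pyGetD p (j - 1) ' ' then PySem.List.pyGetD row (j - 1) 0 else 0))])
      [[(1 : Int)] ++ List.replicate p.length 0])
    = (List.range (t.length + 1)).map (fun i => pvRowP (t.take i) p) := by
  exact pvFoldInv1
    (fun pre i =>
      let row := PySem.List.pyGetD pre (-1) []
      let ch := PySem.List.pyGetD t (i - 1) ' '
      pre ++ [[(1 : Int)] ++ (PySem.List.pyRange 1 ((p.length : Int) + 1) 1).map (fun j =>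
        PySem.List.pyGetD row j 0 +
          (if ch = PySem.List.pyGetD p (j - 1) ' ' then PySem.List.pyGetD row (j - 1) 0 else 0))])
    (fun k s => s = (List.range (k + 1)).map (fun i => pvRowP (t.take i) p))
    [[(1 : Int)] ++ List.replicate p.length 0] t.length
    (by simp [pvRowP_nil])
    (by
      intro k s hk hs
      subst hs
      have hne : (List.range (k + 1)).map (fun i => pvRowP (t.take i) p) ≠ [] := by simp
      have hrow : PySem.List.pyGetD ((List.range (k + 1)).map (fun i => pvRowP (t.take i) p)) (-1) []
          = pvRowP (t.take k) p := by
        rw [PySem.List.pyGetD_neg_one _ _ hne, pvGetLast_map_range _ _ hne]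
      have hch : PySem.List.pyGetD t ((k : ℕ) + 1 - 1 : Int) ' ' = t[k] := by
        have e1 : ((k : ℕ) + 1 - 1 : Int) = ((k : ℕ) : Int) := by ring
        rw [e1, PySem.List.pyGetD_eq_getElem _ _ (by omega) (by exact_mod_cast hk)]
        simp
      simp only [hrow, hch]
      have hsplit : (List.range (k + 1 + 1)).map (fun i => pvRowP (t.take i) p)
          = (List.range (k + 1)).map (fun i => pvRowP (t.take i) p) ++ [pvRowP (t.take (k + 1)) p] := by
        rw [List.range_succ, List.map_append, List.map_cons, List.map_nil]
      rw [hsplit]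
      congr 1
      congr 1
      exact pvNewRowP t p k hk)

lemma pvSuf_eq (t p : List Char) :
    ((PySem.List.pyRange ((t.length : Int) - 1) (-1) (-1)).foldl (fun suf i =>
      let row := PySem.List.pyGetD suf 0 []
      let ch := PySem.List.pyGetD t i ' '
      PySem.List.insert suf 0 ((PySem.List.pyRange 0 ((p.length : Int)) 1).map (fun j =>
        PySem.List.pyGetD row j 0 +
          (if ch = PySem.List.pyGetD p j ' ' then PySem.List.pyGetD row (j + 1) 0 else 0)) ++ [(1 : Int)]))
      [List.replicate p.length 0 ++ [(1 : Int)]])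
    = (List.range (t.length + 1)).map (fun i => pvRowS (t.drop i) p) := by
  have h := pvFoldInvDown
    (fun suf i =>
      let row := PySem.List.pyGetD suf 0 []
      let ch := PySem.List.pyGetD t i ' '
      PySem.List.insert suf 0 ((PySem.List.pyRange 0 ((p.length : Int)) 1).map (fun j =>
        PySem.List.pyGetD row j 0 +
          (if ch = PySem.List.pyGetD p j ' ' then PySem.List.pyGetD row (j + 1) 0 else 0)) ++ [(1 : Int)]))
    (fun k s => s = (List.range' k (t.length + 1 - k)).map (fun i => pvRowS (t.drop i) p))
    t.length [List.replicate p.length 0 ++ [(1 : Int)]]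
    (by
      beta_reduce
      have h1 : t.length + 1 - t.length = 1 := by omega
      rw [h1, List.range'_one, List.map_cons, List.map_nil, List.drop_length, pvRowS_nil])
    (by
      intro k s hk hs
      subst hs
      beta_reduce
      have hcons : List.range' (k + 1) (t.length + 1 - (k + 1))
          = (k + 1) :: List.range' (k + 2) (t.length - k - 1) := by
        have h1 : t.length + 1 - (k + 1) = (t.length - k - 1) + 1 := by omega
        rw [h1, List.range'_succ]
      have hrow : PySem.List.pyGetD ((List.range' (k + 1) (t.length + 1 - (k + 1))).map
          (fun i => pvRowS (t.drop i) p)) 0 [] = pvRowS (t.drop (k + 1)) p := by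
        rw [hcons, List.map_cons, PySem.List.pyGetD_zero_cons]
      have hch : PySem.List.pyGetD t ((k : ℕ) : Int) ' ' = t[k] := by
        rw [PySem.List.pyGetD_eq_getElem _ _ (by omega) (by exact_mod_cast hk)]
        simp
      simp only [hrow, hch, pvInsert_zero]
      have hsplit : List.range' k (t.length + 1 - k)
          = k :: List.range' (k + 1) (t.length + 1 - (k + 1)) := by
        have h1 : t.length + 1 - k = (t.length + 1 - (k + 1)) + 1 := by omega
        rw [h1, List.range'_succ]
      rw [hsplit, List.map_cons]
      congr 1
      exact pvNewRowS t p k hk)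
  rw [h]
  rw [Nat.sub_zero, ← List.range_eq_range']

-- ---- the per-position dictionary ----

lemma pvGains_getD (t p : List Char) (k : ℕ) (c : Char) :
    (pvGains t p k).getD c 0 = pvDelta c (t.drop k) (t.take k) p := by
  have hfold : pvGains t p k = ((List.range p.length).map (fun j => (p.getD j ' ', pvW t p k j))).foldl
      (fun d x => d.insert x.1 (d.getD x.1 0 + x.2)) PySem.Dict.empty := by
    rw [pvGains, List.foldl_map]
  rw [hfold, pvDict_getD_fold, pvSum_filter_range]
  have hempty : (PySem.Dict.empty : PySem.Dict Char Int).getD c 0 = 0 := rfl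
  rw [hempty, zero_add]
  simp only [pvW]
  exact pvSum_eq_delta c (t.take k) (t.drop k) p

lemma pvGains_keys (t p : List Char) (k : ℕ) : (pvGains t p k).keys = PySem.Set.ofList p := by
  rw [pvGains]
  rw [PySem.Dict.keys_foldl_insert_key (List.range p.length) (fun j => p.getD j ' ')
    (fun d j => d.getD (p.getD j ' ') 0 + pvW t p k j) PySem.Dict.empty]
  have hmap : (List.range p.length).map (fun j => p.getD j ' ') = p := by
    apply List.ext_getElem
    · simp
    · intro i h1 h2
      simp only [List.getElem_map, List.getElem_range]
      simp only [List.length_map, List.length_range] at h1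
      exact List.getD_eq_getElem p ' ' h1
  rw [hmap]
  rfl

lemma pvMi_spec (t p : List Char) (k : ℕ) (hp : p ≠ []) :
    (∃ c ∈ p, pvMi t p k = pvDelta c (t.drop k) (t.take k) p) ∧
    (∀ c ∈ p, pvDelta c (t.drop k) (t.take k) p ≤ pvMi t p k) := by
  have hnd : (pvGains t p k).keys.Nodup := by
    rw [pvGains]
    exact PySem.Dict.nodup_keys_foldl_insert_key _ _ _ _ (by
      show (List.nil : List Char).Nodup
      exact List.nodup_nil)
  have hvals := PySem.Dict.values_eq_map_keys (pvGains t p k) hnd 0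
  have hkeys := pvGains_keys t p k
  have hne : (pvGains t p k).values ≠ [] := by
    rw [hvals, hkeys]
    obtain ⟨c, hc⟩ := List.exists_mem_of_ne_nil p hp
    have hmem : c ∈ PySem.Set.ofList p := (PySem.Set.mem_ofList p c).mpr hc
    intro hcontra
    rw [List.map_eq_nil_iff] at hcontra
    rw [hcontra] at hmem
    simp at hmem
  obtain ⟨M, hM⟩ : ∃ M, PySem.List.max? (pvGains t p k).values (fun v => v) = some M := by
    cases hmax : PySem.List.max? (pvGains t p k).values (fun v => v) with
    | none => exact absurd ((PySem.List.max?_eq_none_iff _ _).mp hmax) hne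
    | some M => exact ⟨M, rfl⟩
  have hMi : pvMi t p k = M := by rw [pvMi, hM]; rfl
  constructor
  · have hmem := PySem.List.max?_mem hM
    rw [hvals] at hmem
    obtain ⟨c, hck, hcv⟩ := List.mem_map.mp hmem
    refine ⟨c, ?_, ?_⟩
    · rw [hkeys] at hck
      exact (PySem.Set.mem_ofList p c).mp hck
    · rw [hMi, ← hcv, pvGains_getD]
  · intro c hc
    have hck : c ∈ (pvGains t p k).keys := by
      rw [hkeys]
      exact (PySem.Set.mem_ofList p c).mpr hc
    have hval : (pvGains t p k).getD c 0 ∈ (pvGains t p k).values := by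
      rw [hvals]
      exact List.mem_map_of_mem hck
    have hle := PySem.List.max?_isMax hM _ hval
    rw [hMi, ← pvGains_getD t p k c]
    exact hle

-- ---- fold-max machinery ----

lemma pvFoldNested {α β : Type} (L : List α) (M : List β) (g : α → β → Int) (init : Int) :
    L.foldl (fun acc x => M.foldl (fun a y => max a (g x y)) acc) init
      = (L.flatMap (fun x => M.map (g x))).foldl max init := by
  induction L generalizing init with
  | nil => simp
  | cons x L ih =>
    simp only [List.foldl_cons, List.flatMap_cons, List.foldl_append, ih, List.foldl_map]

-- ---- assembling the two ports ----

lemma pvBody_eq (t p : List Char) (k : ℕ) (acc : Int) :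
    p.foldl (fun max_count ch =>
      max max_count (pvCountSub (PySem.List.slice t none (some ((k : ℕ) : Int)) ++ [ch] ++
        PySem.List.slice t (some ((k : ℕ) : Int)) none) p)) acc
    = p.foldl (fun a c => max a (pvVal t p k c)) acc := by
  apply PySem.List.foldl_congr_mem
  intro acc2 c _
  rw [PySem.List.slice_to _ (by omega), PySem.List.slice_from _ (by omega), pvCS_eq]
  simp only [Int.toNat_natCast]
  have hins : t.take k ++ [c] ++ t.drop k = t.take k ++ (c :: t.drop k) := by
    rw [List.append_assoc, List.singleton_append]
  rw [hins, pvCnt_insert, List.take_append_drop, pvVal]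

lemma pvA_eq (text pattern : String) :
    maximize_subsequences text pattern
      = ((List.range (text.toList.length + 1)).flatMap (fun k =>
          pattern.toList.map (fun c => pvVal text.toList pattern.toList k c))).foldl max 0 := by
  simp only [maximize_subsequences]
  have hb : ((text.toList.length : Int) + 1) = ((text.toList.length + 1 : ℕ) : Int) := by
    push_cast; ring
  rw [hb, PySem.List.pyRange_zero_nat, List.foldl_map]
  rw [PySem.List.foldl_congr_mem _ _ _ _
    (fun acc k _ => pvBody_eq text.toList pattern.toList k acc)]
  rw [pvFoldNested]

lemma pvBestBody_eq (t p : List Char) (k : ℕ) (hk : k < t.length + 1) (best : Int) :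
    max best ((PySem.List.max? ((PySem.List.pyRange 0 ((p.length : ℕ) : Int) 1).foldl (fun d j =>
      d.insert (PySem.List.pyGetD p j ' ')
        (d.getD (PySem.List.pyGetD p j ' ') 0 +
          PySem.List.pyGetD (PySem.List.pyGetD ((List.range (t.length + 1)).map
            (fun i => pvRowP (t.take i) p)) ((k : ℕ) : Int) []) j 0 *
          PySem.List.pyGetD (PySem.List.pyGetD ((List.range (t.length + 1)).map
            (fun i => pvRowS (t.drop i) p)) ((k : ℕ) : Int) []) (j + 1) 0))
      PySem.Dict.empty).values (fun v => v)).getD 0)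
    = max best (pvMi t p k) := by
  have hpre : PySem.List.pyGetD ((List.range (t.length + 1)).map
      (fun i => pvRowP (t.take i) p)) ((k : ℕ) : Int) [] = pvRowP (t.take k) p := by
    rw [pvGetD_map_range_int _ _ _ _ (by omega) (by push_cast; omega)]
    simp only [Int.toNat_natCast]
  have hsuf : PySem.List.pyGetD ((List.range (t.length + 1)).map
      (fun i => pvRowS (t.drop i) p)) ((k : ℕ) : Int) [] = pvRowS (t.drop k) p := by
    rw [pvGetD_map_range_int _ _ _ _ (by omega) (by push_cast; omega)]
    simp only [Int.toNat_natCast]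
  rw [hpre, hsuf, PySem.List.pyRange_zero_nat, List.foldl_map]
  have hbody : ∀ (d : PySem.Dict Char Int), ∀ j ∈ List.range p.length,
      d.insert (PySem.List.pyGetD p ((j : ℕ) : Int) ' ')
        (d.getD (PySem.List.pyGetD p ((j : ℕ) : Int) ' ') 0 +
          PySem.List.pyGetD (pvRowP (t.take k) p) ((j : ℕ) : Int) 0 *
          PySem.List.pyGetD (pvRowS (t.drop k) p) (((j : ℕ) : Int) + 1) 0)
      = d.insert (p.getD j ' ') (d.getD (p.getD j ' ') 0 + pvW t p k j) := by
    intro d j hj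
    have hjm := List.mem_range.mp hj
    have h1 : PySem.List.pyGetD p ((j : ℕ) : Int) ' ' = p.getD j ' ' :=
      PySem.List.pyGetD_natCast p j ' '
    have h2 : PySem.List.pyGetD (pvRowP (t.take k) p) ((j : ℕ) : Int) 0
        = pvCnt (t.take k) (p.take j) := by
      rw [pvRowP, pvGetD_map_range_int _ _ _ _ (by omega) (by push_cast; omega)]
      simp only [Int.toNat_natCast]
    have h3 : PySem.List.pyGetD (pvRowS (t.drop k) p) (((j : ℕ) : Int) + 1) 0
        = pvCnt (t.drop k) (p.drop (j + 1)) := by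
      have e : ((j : ℕ) : Int) + 1 = ((j + 1 : ℕ) : Int) := by push_cast; ring
      rw [pvRowS, e, pvGetD_map_range_int _ _ _ _ (by omega) (by push_cast; omega)]
      simp only [Int.toNat_natCast]
    rw [h1, h2, h3, pvW]
  rw [PySem.List.foldl_congr_mem _ _ _ _ hbody]
  rw [show (List.range p.length).foldl (fun d j =>
      d.insert (p.getD j ' ') (d.getD (p.getD j ' ') 0 + pvW t p k j)) PySem.Dict.empty
    = pvGains t p k from rfl]
  rw [pvMi]

lemma pvB_eq (text pattern : String) (hp : pattern.toList ≠ []) :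
    maximize_subsequences_alt text pattern
      = pvCnt text.toList pattern.toList +
        ((List.range (text.toList.length + 1)).map (fun k => pvMi text.toList pattern.toList k)).foldl max 0 := by
  have hm : ¬ ((pattern.toList.length : Int) = 0) := by
    simpa [Int.natCast_eq_zero, List.length_eq_zero_iff] using hp
  simp only [maximize_subsequences_alt]
  rw [if_neg hm]
  rw [pvPre_eq text.toList pattern.toList, pvSuf_eq text.toList pattern.toList]
  have hbase1 : PySem.List.pyGetD ((List.range (text.toList.length + 1)).map
      (fun i => pvRowP (text.toList.take i) pattern.toList)) ((text.toList.length : ℕ) : Int) []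
      = pvRowP text.toList pattern.toList := by
    rw [pvGetD_map_range_int _ _ _ _ (by omega) (by push_cast; omega)]
    simp only [Int.toNat_natCast]
    rw [List.take_length]
  have hbase2 : PySem.List.pyGetD (pvRowP text.toList pattern.toList)
      ((pattern.toList.length : ℕ) : Int) 0 = pvCnt text.toList pattern.toList := by
    rw [pvRowP, pvGetD_map_range_int _ _ _ _ (by omega) (by push_cast; omega)]
    simp only [Int.toNat_natCast]
    rw [List.take_length]
  rw [hbase1, hbase2]
  have hb2 : ((text.toList.length : Int) + 1) = ((text.toList.length + 1 : ℕ) : Int) := by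
    push_cast; ring
  rw [hb2, PySem.List.pyRange_zero_nat (text.toList.length + 1), List.foldl_map]
  rw [PySem.List.foldl_congr_mem _ _ _ _
    (fun acc k hk => pvBestBody_eq text.toList pattern.toList k (List.mem_range.mp hk) acc)]
  rw [List.foldl_map]

-- ===== VERDICT (by name: the statement is the Claim_ definition above) =====
theorem maximize_subsequences_spec : Claim_equal_maximize_subsequences := by
  intro text pattern _
  unfold Spec_maximize_subsequences
  by_cases hp : pattern.toList = []
  · have hA : maximize_subsequences text pattern = 0 := by
      rw [pvA_eq]
      have hnil : (List.range (text.toList.length + 1)).flatMap (fun k =>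
          pattern.toList.map (fun c => pvVal text.toList pattern.toList k c)) = [] := by
        simp [hp, List.flatMap_eq_nil_iff]
      rw [hnil]
      rfl
    have hB : maximize_subsequences_alt text pattern = 0 := by
      simp [maximize_subsequences_alt, hp]
    rw [hA, hB]
  · set t := text.toList
    set p := pattern.toList
    rw [pvA_eq, pvB_eq text pattern hp]
    set n := t.length
    set base := pvCnt t p with hbase
    set flat := (List.range (n + 1)).flatMap (fun k => p.map (fun c => pvVal t p k c)) with hflat
    set mis := (List.range (n + 1)).map (fun k => pvMi t p k) with hmis
    have hbase_nn : 0 ≤ base := pvCnt_nonneg t p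
    have hA_le := PySem.List.le_foldl_max flat (0 : Int)
    have hB_le := PySem.List.le_foldl_max mis (0 : Int)
    have hmem_flat : ∀ k < n + 1, ∀ c ∈ p, pvVal t p k c ∈ flat := by
      intro k hk c hc
      rw [hflat, List.mem_flatMap]
      exact ⟨k, List.mem_range.mpr hk, List.mem_map_of_mem hc⟩
    have hmem_mis : ∀ k < n + 1, pvMi t p k ∈ mis := by
      intro k hk
      rw [hmis]
      exact List.mem_map_of_mem (List.mem_range.mpr hk)
    apply le_antisymm
    · rcases PySem.List.foldl_max_mem flat (0 : Int) with h | h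
      · rw [h]
        have := (PySem.List.le_foldl_max mis (0 : Int)).1
        omega
      · rw [hflat] at h
        rw [List.mem_flatMap] at h
        obtain ⟨k, hk, hmem⟩ := h
        rw [List.mem_map] at hmem
        obtain ⟨c, hc, hv⟩ := hmem
        rw [← hv]
        have h1 : pvDelta c (t.drop k) (t.take k) p ≤ pvMi t p k :=
          (pvMi_spec t p k hp).2 c hc
        have h2 : pvMi t p k ≤ mis.foldl max 0 :=
          hB_le.2 _ (hmem_mis k (List.mem_range.mp hk))
        rw [← hflat] at *
        simp only [pvVal]
        omega
    · rcases PySem.List.foldl_max_mem mis (0 : Int) with h | h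
      · rw [h]
        -- base ≤ A's max: A's candidate at k = 0 with c = p.head is ≥ base
        obtain ⟨c, hc⟩ := List.exists_mem_of_ne_nil p hp
        have hv : pvVal t p 0 c ∈ flat := hmem_flat 0 (by omega) c hc
        have h1 := hA_le.2 _ hv
        have h2 : base ≤ pvVal t p 0 c := by
          simp only [pvVal, ← hbase]
          have := pvDelta_nonneg c (t.drop 0) (t.take 0) p
          omega
        omega
      · rw [hmis] at h
        rw [List.mem_map] at h
        obtain ⟨k, hk, hv⟩ := h
        obtain ⟨c, hc, hce⟩ := (pvMi_spec t p k hp).1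
        have hvmem : pvVal t p k c ∈ flat := hmem_flat k (List.mem_range.mp hk) c hc
        have := hA_le.2 _ hvmem
        simp only [pvVal] at this
        rw [← hv, hce]
        omega
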